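/-
  jsmn_d.bin / jsmn_s.bin: jsmn_parse CALLED DIRECTLY WITH A PREPARED PARSER STATE, through the second stub `_start_call6` (proofs/c6/start.S; 75 bytes at
  1005E0H in jsmn_d.bin, at 1006B0H in jsmn_s.bin; the same bytes in both) — this is how proofs/c6/harness.py (`model_parse`) exercises the RE-ENTRANT
  contract of jsmn_parse: the parser struct {pos, toknext, toksuper} and the token array are whatever an earlier call left.
      mov rdi,[1FF000H] ; mov rsi,[1FF008H] ; mov rdx,[1FF010H] ; mov rcx,[1FF018H] ; mov r8,[1FF030H] ; mov r9,[1FF038H] ; mov rax,[1FF040H] ;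
      call rax ; mov [1FF020H],rax ; mov [3FFFF8H],rax ; hlt
  View level, written ONCE for a `Bin` `b` with a `Stub6 b A` (`A` = the three addresses of the stub: entry, return point, `hlt`).

  THE LAYOUT of a `parse` run (harness.py): the image at 100000H; the parameter block at 1FF000H = [PARSER = 3FF000H, JS = 200000H, len, tokens =
  400000H or 0 (counting mode), -, -, num_tokens, 0, fn = jsmn_parse]; the text at 200000H (at most 1FF000H bytes); the 12-byte parser struct at
  3FF000H; the token array at 400000H; RSP = 800000H; 16 MB mapped (a layout `n : User.Layout` with `n.pages = 8`). `Layout6 b A v0 js p toks N`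
  says this of a user state `v0`.

    stub6_head_D / _S         the seven loads and the INDIRECT `call rax` (v3_walk steps FF D0 like any call: RIP = the loaded value)
    stub6_tail_D / _S         the two stores of rax, up to the `hlt` (not executed here)
    parse_pre                 EVERY hypothesis of jsmn_parse's contract (`ScanPre`: CallPre, the five arguments, the text, the parser struct, the
                              tokens argument, `Env`: the three regions pairwise disjoint, off the image and the stack window) holds at the view
                              after the `call rax`, for every text of at most 1FF000H bytes and every N with sizeof(jsmntok_t) * N ≤ 3F8000H
    parse_from_start_reach    from the stub's first instruction to its `hlt`: eax = r, the parser struct = p', the tokens = toks', where (r, p', toks')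
                              is WHATEVER the model `Jsmn.parseFuel` answers from the prepared state (only `Inv` is assumed of it), + the frame clause
-/
import Prog.Jsmn.Start
import Prog.Jsmn.RunLemmas

namespace X86
namespace J6
namespace Call6
open X86.User (CodeAt RegsKept Span FlagsOK Layout toNat_add_ofNat toNat_ofNat_lt' add_ofNat_add)
open Jsmn Start

set_option maxRecDepth 100000
set_option maxHeartbeats 4000000
set_option linter.unusedSimpArgs false
set_option linter.unusedVariables false

/-- The three addresses of the stub `_start_call6` in an image: its first instruction, the return point of its `call rax`, its `hlt`. -/
structure Addr6 where
  entry : Word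
  ret : Word
  hlt : Word

/-- jsmn_d.bin: `_start_call6` at 1005E0H. -/
def addrD : Addr6 := ⟨0x1005e0, 0x10061a, 0x10062a⟩
/-- jsmn_s.bin: `_start_call6` at 1006B0H. -/
def addrS : Addr6 := ⟨0x1006b0, 0x1006ea, 0x1006fa⟩

/-- The view at the entry of the called function `fn`, against the view `v0` at the stub's entry: WHAT CHANGED. The stub loads rdi, rsi, rdx, rcx,
r8, r9 and rax from the parameter block and executes `call rax`: RSP goes from 800000H to 7FFFF8H, the return address is stored there. -/
structure AtFn (ret fn : Word) (v0 : User.State) (a0 a1 a2 a3 a4 a5 : Word) (v : User.State) : Prop where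
  rip : v.rip = fn
  rsp : v.reg .rsp = 0x7ffff8
  rdi : v.reg .rdi = a0
  rsi : v.reg .rsi = a1
  rdx : v.reg .rdx = a2
  rcx : v.reg .rcx = a3
  r8 : v.reg .r8 = a4
  r9 : v.reg .r9 = a5
  mem : v.mem = v0.mem.writeLE 0x7ffff8 8 ret.toNat

/-- The view at the stub's `hlt`, against the view `v` at the function's return point: registers unchanged, rax stored twice. -/
def AtHlt6 (hlt : Word) (v v' : User.State) : Prop :=
  v'.rip = hlt ∧ (∀ r, v'.reg r = v.reg r) ∧
    v'.mem = (v.mem.writeLE 0x1ff020 8 (v.reg .rax).toNat).writeLE 0x3ffff8 8 (v.reg .rax).toNat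

section
variable {n : User.Layout} (v0 : User.State) (a0 a1 a2 a3 a4 a5 fn : Word) (hn4 : 0x800000 ≤ n.pages * 0x200000)
  (hrsp : v0.reg .rsp = 0x800000)
  (h0 : UInt64.ofNat (v0.mem.readLE 0x1ff000 8) = a0) (h1 : UInt64.ofNat (v0.mem.readLE 0x1ff008 8) = a1)
  (h2 : UInt64.ofNat (v0.mem.readLE 0x1ff010 8) = a2) (h3 : UInt64.ofNat (v0.mem.readLE 0x1ff018 8) = a3)
  (h4 : UInt64.ofNat (v0.mem.readLE 0x1ff030 8) = a4) (h5 : UInt64.ofNat (v0.mem.readLE 0x1ff038 8) = a5)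
  (h6 : UInt64.ofNat (v0.mem.readLE 0x1ff040 8) = fn) (hfn : fn < 0x40000000)
include hn4 hrsp h0 h1 h2 h3 h4 h5 h6 hfn

/-- `_start_call6` of jsmn_d.bin: seven loads, `call rax`, return address 10061AH. -/
theorem stub6_head_D (hcode : CodeAt v0.mem 0x1005e0 JsmnDBytes.start_call6_bytes) (hrip : v0.rip = 0x1005e0) :
    Reach n v0 (AtFn 0x10061a fn v0 a0 a1 a2 a3 a4 a5) := by
  have hfetch := stub_fetch (n := n) hn4
  v3_walk hcode hfetch [hfn]
  exact Reach.done ⟨by simp, by simp, by simp, by simp, by simp, by simp, by simp, by simp, by simp⟩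

/-- `_start_call6` of jsmn_s.bin: seven loads, `call rax`, return address 1006EAH. -/
theorem stub6_head_S (hcode : CodeAt v0.mem 0x1006b0 JsmnSBytes.start_call6_bytes) (hrip : v0.rip = 0x1006b0) :
    Reach n v0 (AtFn 0x1006ea fn v0 a0 a1 a2 a3 a4 a5) := by
  have hfetch := stub_fetch (n := n) hn4
  v3_walk hcode hfetch [hfn]
  exact Reach.done ⟨by simp, by simp, by simp, by simp, by simp, by simp, by simp, by simp, by simp⟩

end

/-- jsmn_d.bin's `_start_call6` after the return (10061AH): `mov [1FF020H], rax ; mov [3FFFF8H], rax`, then the `hlt` at 10062AH. -/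
theorem stub6_tail_D {n : User.Layout} (v : User.State) (hn4 : 0x800000 ≤ n.pages * 0x200000)
    (hcode : CodeAt v.mem 0x1005e0 JsmnDBytes.start_call6_bytes) (hrip : v.rip = 0x10061a) : Reach n v (AtHlt6 0x10062a v) := by
  have hfetch := stub_fetch (n := n) hn4
  v3_walk hcode hfetch [] until [0x10062a]
  exact Reach.done ⟨by simp, fun r => by simp, by simp⟩

/-- jsmn_s.bin's `_start_call6` after the return (1006EAH). -/
theorem stub6_tail_S {n : User.Layout} (v : User.State) (hn4 : 0x800000 ≤ n.pages * 0x200000)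
    (hcode : CodeAt v.mem 0x1006b0 JsmnSBytes.start_call6_bytes) (hrip : v.rip = 0x1006ea) : Reach n v (AtHlt6 0x1006fa v) := by
  have hfetch := stub_fetch (n := n) hn4
  v3_walk hcode hfetch [] until [0x1006fa]
  exact Reach.done ⟨by simp, fun r => by simp, by simp⟩

/-! ### The stub of a binary, and harness.py's layout of a `parse` run -/

/-- What is known of `_start_call6` in the image `b` (`A` = its addresses): the image is small, jsmn_parse's stack budget and address, the two walks,
the `hlt`. -/
structure Stub6 (b : Bin) (A : Addr6) : Prop where
  len : b.image.length ≤ 0x1000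
  use : b.useParse ≤ 96
  fnlt : b.parse < 0x40000000
  head : ∀ (n : User.Layout), n.pages = 8 → ∀ (v0 : User.State) (a0 a1 a2 a3 a4 a5 fn : Word), v0.reg .rsp = 0x800000 →
    UInt64.ofNat (v0.mem.readLE 0x1ff000 8) = a0 → UInt64.ofNat (v0.mem.readLE 0x1ff008 8) = a1 →
    UInt64.ofNat (v0.mem.readLE 0x1ff010 8) = a2 → UInt64.ofNat (v0.mem.readLE 0x1ff018 8) = a3 →
    UInt64.ofNat (v0.mem.readLE 0x1ff030 8) = a4 → UInt64.ofNat (v0.mem.readLE 0x1ff038 8) = a5 →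
    UInt64.ofNat (v0.mem.readLE 0x1ff040 8) = fn → fn < 0x40000000 →
    CodeAt v0.mem 0x100000 b.image → v0.rip = A.entry → Reach n v0 (AtFn A.ret fn v0 a0 a1 a2 a3 a4 a5)
  tail : ∀ (n : User.Layout), n.pages = 8 → ∀ v : User.State, CodeAt v.mem 0x100000 b.image → v.rip = A.ret → Reach n v (AtHlt6 A.hlt v)
  hlt : ∀ μ : User.Mem, CodeAt μ 0x100000 b.image → CodeAt μ A.hlt [0xF4]
  retlt : A.ret < 0x40000000

theorem stub6D : Stub6 binD addrD where
  len := by rw [binD_image, JsmnDBytes.image_bytes_length]; decide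
  use := by decide
  fnlt := by decide
  head := fun n hn v0 a0 a1 a2 a3 a4 a5 fn hrsp h0 h1 h2 h3 h4 h5 h6 hfn himg hrip =>
    stub6_head_D v0 a0 a1 a2 a3 a4 a5 fn (by omega) hrsp h0 h1 h2 h3 h4 h5 h6 hfn (JsmnD.tjd_start_call6_code himg) hrip
  tail := fun n hn v himg hrip => stub6_tail_D v (by omega) (JsmnD.tjd_start_call6_code himg) hrip
  hlt := fun μ himg => CodeAt.at (bs := JsmnDBytes.image_bytes) himg _ 0x62a 1 _ (by decide) (by decide) (by decide)
  retlt := by decide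

theorem stub6S : Stub6 binS addrS where
  len := by rw [binS_image, JsmnSBytes.image_bytes_length]; decide
  use := by decide
  fnlt := by decide
  head := fun n hn v0 a0 a1 a2 a3 a4 a5 fn hrsp h0 h1 h2 h3 h4 h5 h6 hfn himg hrip =>
    stub6_head_S v0 a0 a1 a2 a3 a4 a5 fn (by omega) hrsp h0 h1 h2 h3 h4 h5 h6 hfn (JsmnS.tjs_start_call6_code himg) hrip
  tail := fun n hn v himg hrip => stub6_tail_S v (by omega) (JsmnS.tjs_start_call6_code himg) hrip
  hlt := fun μ himg => CodeAt.at (bs := JsmnSBytes.image_bytes) himg _ 0x6fa 1 _ (by decide) (by decide) (by decide)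
  retlt := by decide

/-- Where the `tokens` argument of a `parse` run points: 400000H, or NULL in counting mode. -/
def tbOf : Option Tokens → Word
  | none => 0
  | some _ => 0x400000

/-- What the start machine's view shows on harness.py's layout of a `parse` run, for an ABSTRACT view `v0`: the prepared parser state `p` at 3FF000H,
the prepared tokens `toks` at 400000H (or counting mode: `toks = none`, the tokens pointer is NULL). -/
structure Layout6 (b : Bin) (A : Addr6) (v0 : User.State) (js : List UInt8) (p : Parser) (toks : Option Tokens) (N : Nat) : Prop where
  rip : v0.rip = A.entry
  rsp : v0.reg .rsp = 0x800000
  image : CodeAt v0.mem 0x100000 b.image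
  a0 : UInt64.ofNat (v0.mem.readLE 0x1ff000 8) = 0x3ff000
  a1 : UInt64.ofNat (v0.mem.readLE 0x1ff008 8) = 0x200000
  a2 : UInt64.ofNat (v0.mem.readLE 0x1ff010 8) = UInt64.ofNat js.length
  a3 : UInt64.ofNat (v0.mem.readLE 0x1ff018 8) = tbOf toks
  a4 : UInt64.ofNat (v0.mem.readLE 0x1ff030 8) = UInt64.ofNat N
  a5 : UInt64.ofNat (v0.mem.readLE 0x1ff038 8) = 0
  fn : UInt64.ofNat (v0.mem.readLE 0x1ff040 8) = b.parse
  input : CodeAt v0.mem 0x200000 js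
  parser : ParserAt v0.mem 0x3ff000 p
  toks : ToksArg b.cfg v0.mem (tbOf toks) N toks

/-- What a `parse` run may write: jsmn_parse's stack window and the return address below 800000H, the parser struct, the token array, and the two
slots where the stub stores rax. -/
def wins6 (b : Bin) (toks : Option Tokens) (N : Nat) : Windows :=
  [(0x7ffff8 - b.useParse, 0x800000), (0x3ff000, 0x3ff00c), ((tbOf toks).toNat, (tbOf toks).toNat + toksBytes b.cfg N toks),
    (0x1ff020, 0x1ff028), (0x3ffff8, 0x400000)]

/-- **The end of a `parse` run**, as seen in the view `v` at the stub's `hlt` (not yet executed), against the start view `v0`: eax = `r` (also stored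
at 3FFFF8H, where the harness reads it), the parser struct at 3FF000H = `p'`, the tokens argument = `toks'`, NOTHING CHANGED outside `wins6` (the
stack window, the parser struct, the token array, the two result slots), the image in place and the next byte a `hlt`. -/
structure AtEnd6 (b : Bin) (A : Addr6) (v0 : User.State) (toks : Option Tokens) (N : Nat) (r : Int) (p' : Parser) (toks' : Option Tokens)
    (v : User.State) : Prop where
  rip : v.rip = A.hlt
  rsp : v.reg .rsp = 0x800000
  rax : v.reg .rax = UInt64.ofNat (u32 r)
  slot : v.mem.readLE 0x3ffff8 8 = u32 r
  parser : ParserAt v.mem 0x3ff000 p'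
  toksArg : ToksArg b.cfg v.mem (tbOf toks) N toks'
  same : SameOutside v0.mem v.mem (wins6 b toks N)
  image : CodeAt v.mem 0x100000 b.image
  hlt : CodeAt v.mem A.hlt [0xF4]

section
variable {b : Bin} {A : Addr6} {n : User.Layout} {v0 v : User.State} {js : List UInt8} {p : Parser} {toks : Option Tokens} {N : Nat}

theorem tbOf_toNat_le (toks : Option Tokens) : (tbOf toks).toNat ≤ 0x400000 := by
  cases toks with
  | none => show (0 : Word).toNat ≤ _; decide
  | some _ => show (0x400000 : Word).toNat ≤ _; decide

theorem toksBytes_le (hN : b.cfg.tokSize * N ≤ 0x3F8000) (toks : Option Tokens) : toksBytes b.cfg N toks ≤ 0x3F8000 := by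
  cases toks with
  | none => simp [toksBytes]
  | some ts => exact hN

/-- The `tokens` argument is NULL with no bytes, or 400000H. -/
theorem tb_cases (cfg : Jsmn.Config) (toks : Option Tokens) (N : Nat) :
    ((tbOf toks).toNat = 0 ∧ toksBytes cfg N toks = 0) ∨ (tbOf toks).toNat = 0x400000 := by
  cases toks with
  | none => exact Or.inl ⟨rfl, rfl⟩
  | some _ => exact Or.inr rfl

/-- A store clear of 400000H .. 7F8000H keeps the `tokens` argument (NULL, or an array of at most 3F8000H bytes at 400000H). -/
theorem toksArg_writeLE {cfg : Jsmn.Config} {μ : User.Mem} {toks tk : Option Tokens} {N : Nat} (h : ToksArg cfg μ (tbOf toks) N tk)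
    (hN : cfg.tokSize * N ≤ 0x3F8000) (a : Word) (k x : Nat) (hk : a.toNat + k < 2 ^ 64)
    (hd : a.toNat + k ≤ 0x400000 ∨ 0x7F8000 ≤ a.toNat) : ToksArg cfg (μ.writeLE a k x) (tbOf toks) N tk := by
  cases tk with
  | none => exact h
  | some ts =>
    obtain ⟨h0, hl, ht⟩ := h
    cases toks with
    | none => exact absurd rfl h0
    | some t0 =>
      have e : (tbOf (some t0)).toNat = 0x400000 := rfl
      exact ⟨h0, hl, ht.frame (User.Mem.EqOn.writeLE _ _ μ a k x hk (by rw [e, hl]; omega)) (by rw [e, hl]; omega)⟩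

/-- **All hypotheses of jsmn_parse's contract hold at its entry on harness.py's layout of a `parse` run**, for every text of at most 1FF000H
bytes and every `N` whose token array (sizeof(jsmntok_t) * N bytes at 400000H) ends below 7F8000H. -/
theorem parse_pre (hn : n.pages = 8) (hs : Stub6 b A) (hl : Layout6 b A v0 js p toks N) (hjs : js.length ≤ 0x1FF000) (hN : b.cfg.tokSize * N ≤ 0x3F8000)
    (hv : AtFn A.ret b.parse v0 0x3ff000 0x200000 (UInt64.ofNat js.length) (tbOf toks) (UInt64.ofNat N) 0 v) :
    ScanPre b n b.parse b.useParse v A.ret 0x3ff000 0x200000 (tbOf toks) js N p toks := by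
  have hlen := hs.len
  have huse := hs.use
  have hsz : 16 ≤ b.cfg.tokSize := by unfold Jsmn.Config.tokSize; split <;> omega
  have hNlt : N < 0x40000 := by
    have : 16 * N ≤ b.cfg.tokSize * N := Nat.mul_le_mul_right _ hsz
    omega
  have hsp : (v.reg .rsp).toNat = 0x7ffff8 := by rw [hv.rsp]; rfl
  have hlo : 0x100000 = 0x100000 := rfl
  have hmem : v.mem = v0.mem.writeLE 0x7ffff8 8 A.ret.toNat := hv.mem
  have htb := tbOf_toNat_le toks
  have htl := toksBytes_le hN toks
  have hpa : ((0x3ff000 : Word)).toNat = 0x3ff000 := rfl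
  have hja : ((0x200000 : Word)).toNat = 0x200000 := rfl
  have hsk : ((0x7ffff8 : Word)).toNat = 0x7ffff8 := rfl
  have hba : ((0x100000 : Word)).toNat = 0x100000 := rfl
  exact
    { call :=
        { img := by
            rw [hmem]
            exact CodeAt.writeLE (base := 0x100000) hl.image _ _ _ (by rw [hba]; omega) (by decide) (Or.inr (by rw [hba, hsk]; omega))
          imgR := by rw [hba]; omega
          mapped := by omega
          nle := by omega
          rip := hv.rip
          spR := by unfold User.inRange; rw [hsp, hn]; decide
          spLo := by rw [hsp, hlo]; omega
          retAddr := by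
            rw [hv.rsp, hmem, User.Mem.readLE_writeLE_same' _ _ _ _ (by decide)]
            have := hs.retlt
            have h2 : A.ret.toNat < 0x40000000 := this
            rw [Nat.mod_eq_of_lt (by omega)]
            exact UInt64.ofNat_toNat
          retlt := hs.retlt
          sImage := by right; rw [hsp, hba]; omega }
      rdi := hv.rdi
      rsi := hv.rsi
      rdx := hv.rdx
      rcx := hv.rcx
      nlt := by omega
      jslt := by omega
      text := by
        rw [hmem]
        exact CodeAt.writeLE hl.input _ _ _ (by rw [hja]; omega) (by decide) (Or.inr (by rw [hja, hsk]; omega))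
      parser := by
        rw [hmem]
        exact hl.parser.frame (User.Mem.EqOn.writeLE _ _ _ _ _ _ (by decide) (Or.inr (by rw [hpa, hsk]; omega))) (by rw [hpa]; omega)
      toksArg := by
        rw [hmem]
        exact toksArg_writeLE hl.toks hN _ _ _ (by decide) (Or.inr (by rw [hsk]; omega))
      env :=
        { parserR := ⟨by rw [hlo]; decide, by rw [hpa]; omega, Or.inr (by rw [hpa]; omega), Or.inl (by rw [hsp, hpa]; omega)⟩
          jsR := ⟨by rw [hlo]; decide, by rw [hja]; omega, Or.inr (by rw [hja]; omega), Or.inl (by rw [hsp, hja]; omega)⟩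
          toksR := by
            cases toks with
            | none => exact Or.inl rfl
            | some ts =>
              have e : (tbOf (some ts)).toNat = 0x400000 := rfl
              simp only [toksBytes] at htl ⊢
              exact Or.inr ⟨by rw [hlo, e]; omega, by rw [e]; omega, Or.inr (by rw [e]; omega), Or.inl (by rw [hsp, e]; omega)⟩
          parserJs := Or.inr (by rw [hpa, hja]; omega)
          parserToks := by
            cases toks with
            | none => exact Or.inr (by simp [toksBytes, tbOf])
            | some ts => exact Or.inl (by show (0x3ff000 : Word).toNat + 12 ≤ (0x400000 : Word).toNat; decide)
          jsToks := by
            cases toks with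
            | none => exact Or.inr (by simp [toksBytes, tbOf])
            | some ts =>
              have e : (tbOf (some ts)).toNat = 0x400000 := rfl
              exact Or.inl (by rw [e, hja]; omega) } }

/-- **View level, from the first instruction of `_start_call6` to its `hlt` (not executed)**, given the contract of jsmn_parse: the seven loads, the
`call rax`, jsmn_parse ON THE PREPARED STATE (by `hparse`), the two stores of rax. At the `hlt`: eax = r (also stored at 3FFFF8H, where the harness
reads it), the parser struct = p', the tokens = toks' — (r, p', toks') being WHATEVER the model answers from the prepared state `p`, `toks`, of which
only `Inv` is assumed — nothing changed outside `wins6`, and the image still in place (so the next byte is the `hlt`). -/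
theorem parse_from_start_reach (hn : n.pages = 8) (hs : Stub6 b A) (hparse : ParseSpec b n) (hl : Layout6 b A v0 js p toks N) (hjs : js.length ≤ 0x1FF000)
    (hN : b.cfg.tokSize * N ≤ 0x3F8000) {fuel : Nat} {r : Int} {p' : Parser} {toks' : Option Tokens} (hinv : Inv b.cfg p toks N)
    (hmodel : parseFuel b.cfg fuel js p toks N = some (r, p', toks')) :
    Reach n v0 (AtEnd6 b A v0 toks N r p' toks') := by
  have hlen := hs.len
  have huse := hs.use
  have hsz : 16 ≤ b.cfg.tokSize := by unfold Jsmn.Config.tokSize; split <;> omega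
  have hNlt : N < 0x40000 := by
    have : 16 * N ≤ b.cfg.tokSize * N := Nat.mul_le_mul_right _ hsz
    omega
  have htl := toksBytes_le hN toks
  have htc := tb_cases b.cfg toks N
  have hpa : ((0x3ff000 : Word)).toNat = 0x3ff000 := rfl
  have hba : ((0x100000 : Word)).toNat = 0x100000 := rfl
  have hs1 : ((0x1ff020 : Word)).toNat = 0x1ff020 := rfl
  have hs2 : ((0x3ffff8 : Word)).toNat = 0x3ffff8 := rfl
  have hsk : ((0x7ffff8 : Word)).toNat = 0x7ffff8 := rfl
  refine (hs.head n hn v0 _ _ _ _ _ _ _ hl.rsp hl.a0 hl.a1 hl.a2 hl.a3 hl.a4 hl.a5 hl.fn hs.fnlt hl.image hl.rip).trans fun v1 hv1 => ?_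
  have hpre := parse_pre hn hs hl hjs hN hv1
  have hr8 : Word.low .w32 (v1.reg .r8) = UInt64.ofNat N := by
    rw [hv1.r8]
    exact Word.low_of_lt _ (by show (UInt64.ofNat N).toNat < 2 ^ 32; rw [toNat_ofNat_lt' _ (by omega)]; omega)
  refine (hparse v1 A.ret 0x3ff000 0x200000 (tbOf toks) js N p toks fuel r p' toks' hpre hr8 hinv hmodel).trans fun v2 hpost => ?_
  have hsp1 : (v1.reg .rsp).toNat = 0x7ffff8 := by rw [hv1.rsp]; rfl
  have hsame12 := hpost.ret.same
  unfold dataWins at hsame12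
  rw [hsp1, hpa] at hsame12
  have himg2 : CodeAt v2.mem 0x100000 b.image := by
    refine hsame12.codeAt hpre.call.img (by rw [hba]; omega) ?_
    simp only [clear_cons, clear_nil, and_true, hba]
    omega
  refine (hs.tail n hn v2 himg2 hpost.ret.rip).mono fun v3 ⟨hrip3, hregs3, hmem3⟩ => ?_
  have hrax2 : v2.reg .rax = UInt64.ofNat (u32 r) := hpost.rax
  have hu := u32_lt r
  have hraxn : (v2.reg .rax).toNat = u32 r := by rw [hrax2]; exact toNat_ofNat_lt' _ (by omega)
  have himg3 : CodeAt v3.mem 0x100000 b.image := by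
    rw [hmem3]
    refine CodeAt.writeLE (CodeAt.writeLE himg2 _ _ _ ?_ (by decide) (Or.inr ?_)) _ _ _ ?_ (by decide) (Or.inr ?_) <;>
      simp only [UInt64.reduceToNat] <;> omega
  have hsame01 : SameOutside v0.mem v1.mem (wins6 b toks N) := by
    rw [hv1.mem]
    exact SameOutside.writeLE_in _ _ _ _ (by decide) ⟨(0x7ffff8 - b.useParse, 0x800000), by simp [wins6], by rw [hsk]; dsimp only; omega, by rw [hsk]; dsimp only; omega⟩
  have hsame12' : SameOutside v1.mem v2.mem (wins6 b toks N) := by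
    refine hsame12.mono fun a ha => ?_
    simp only [wins6, outside_cons, outside_nil, and_true] at ha ⊢
    omega
  have hsame23 : SameOutside v2.mem v3.mem (wins6 b toks N) := by
    rw [hmem3]
    refine (SameOutside.writeLE_in _ _ _ _ (by decide) ⟨(0x1ff020, 0x1ff028), by simp [wins6], by rw [hs1]; dsimp only; omega, by rw [hs1]; dsimp only; omega⟩).trans
      (SameOutside.writeLE_in _ _ _ _ (by decide) ⟨(0x3ffff8, 0x400000), by simp [wins6], by rw [hs2]; dsimp only; omega, by rw [hs2]; dsimp only; omega⟩)
  refine ⟨hrip3, ?_, by rw [hregs3]; exact hrax2, ?_, ?_, ?_, (hsame01.trans hsame12').trans hsame23, himg3, hs.hlt _ himg3⟩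
  · rw [hregs3, hpost.ret.rsp, hv1.rsp]; decide
  · rw [hmem3, User.Mem.readLE_writeLE_same' _ _ _ _ (by decide), hraxn]
    exact Nat.mod_eq_of_lt (by omega)
  · rw [hmem3]
    exact hpost.parser.frame (User.Mem.EqOn.step_writeLE _ _ _ (User.Mem.EqOn.writeLE _ _ _ _ _ _ (by decide) (Or.inl (by rw [hs1, hpa]; omega)))
      (by decide) (Or.inr (by rw [hs2, hpa]; omega))) (by rw [hpa]; omega)
  · rw [hmem3]
    exact toksArg_writeLE (toksArg_writeLE hpost.toks hN _ _ _ (by decide) (Or.inl (by rw [hs1]; omega))) hN _ _ _ (by decide)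
      (Or.inl (by rw [hs2]; omega))

end

end Call6
end J6
end X86

#print axioms X86.J6.Call6.parse_from_start_reach
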